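-- pv_equiv track=rewrite | github.com/SeoArin9142/GameChatTranslator | GameChatTranslator/Distribution/paddleocr_runner.py | parse_language_groups
-- ===== SOURCE A (Python) =====
-- def parse_language_groups(raw_value):
--     groups = []
--     seen = set()
--
--     for chunk in (raw_value or "").split("|"):
--         for token in chunk.replace(",", "+").split("+"):
--             value = token.strip()
--             if value and value not in seen:
--                 groups.append(value)
--                 seen.add(value)
--
--     return groups
-- ===== SOURCE B (Python) =====
-- def parse_language_groups(raw_value):
--     # One flat character scan splits on all three delimiters at once,
--     # then an ordered dict does the dedup.
--     tokens = []
--     cur = []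
--     for ch in (raw_value or ""):
--         if ch in "|+,":
--             tokens.append("".join(cur))
--             cur = []
--         else:
--             cur.append(ch)
--     tokens.append("".join(cur))
--     return list(dict.fromkeys(v for v in (t.strip() for t in tokens) if v))
-- ===== Notes on version B (the rewrite author's own statement) =====
-- stated objective: alternative
-- what changed: Replaces the nested pipe-split / comma-to-plus-replace-and-split loops plus the manual seen-set bookkeeping with a single flat character scan that splits on all three delimiters at once, followed by an ordered dict.fromkeys dedup of the stripped non-empty tokens.
import Mathlib
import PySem

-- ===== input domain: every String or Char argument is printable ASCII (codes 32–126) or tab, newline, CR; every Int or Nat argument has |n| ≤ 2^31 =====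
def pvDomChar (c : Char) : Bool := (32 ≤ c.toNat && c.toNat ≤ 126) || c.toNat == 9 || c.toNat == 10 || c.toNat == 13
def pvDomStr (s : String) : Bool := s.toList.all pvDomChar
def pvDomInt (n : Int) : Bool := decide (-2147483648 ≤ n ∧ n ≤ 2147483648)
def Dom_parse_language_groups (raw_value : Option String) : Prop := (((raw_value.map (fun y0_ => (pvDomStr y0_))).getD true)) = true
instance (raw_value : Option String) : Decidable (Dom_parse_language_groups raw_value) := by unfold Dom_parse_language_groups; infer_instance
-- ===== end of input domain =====

-- B replaces the nested pipe-split then replace-and-split loops plus the manual seen-set with a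
-- single flat character scan over all three delimiters followed by an ordered-dict dedup (alternative decomposition, same cost).

-- ===== PORT A =====
def parse_language_groups (raw_value : Option String) : List String :=
  ((PySem.Chars.splitOn (raw_value.getD "").toList ['|']).foldl
    (fun (st : List (List Char) × PySem.Set (List Char)) chunk =>
      (PySem.Chars.splitOn (PySem.Chars.replace chunk [','] ['+']) ['+']).foldl
        (fun (st : List (List Char) × PySem.Set (List Char)) token =>
          let value := PySem.Chars.strip token
          if !value.isEmpty && !st.2.contains value then
            (st.1 ++ [value], st.2.add value)
          else st) st)
    ([], PySem.Set.empty)).1.map String.mk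

-- ===== PORT B =====
def parse_language_groups_alt (raw_value : Option String) : List String :=
  let st := (raw_value.getD "").toList.foldl
    (fun (st : List (List Char) × List Char) ch =>
      if ch = '|' || ch = '+' || ch = ',' then (st.1 ++ [st.2], ([] : List Char))
      else (st.1, st.2 ++ [ch]))
    ([], [])
  let tokens := st.1 ++ [st.2]
  (PySem.List.dedup ((tokens.map PySem.Chars.strip).filter (fun v => !v.isEmpty))).map String.mk

-- ===== PRECONDITION & SPEC =====
def Spec_parse_language_groups (raw_value : Option String) (out : List String) : Prop := out = parse_language_groups_alt raw_value
instance (raw_value : Option String) (out : List String) : Decidable (Spec_parse_language_groups raw_value out) := by unfold Spec_parse_language_groups; infer_instance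

-- ===== CLAIM (what is proved, stated in full; the proofs are below) =====
def Claim_equal_parse_language_groups : Prop := ∀ (raw_value : Option String), Dom_parse_language_groups raw_value → Spec_parse_language_groups raw_value (parse_language_groups raw_value)

-- ===== LEMMAS AND PROOFS =====

/-- The three delimiter characters. -/
def pvIsDelim (c : Char) : Bool := c = '|' || c = '+' || c = ','

/-- The comma→plus substitution performed by A's `replace`. -/
def pvSub (c : Char) : Char := if c = ',' then '+' else c

/-- Split on one character (canonical form of `PySem.Chars.splitOn s [d]`). -/
def pvSplit1 (d : Char) : List Char → List (List Char)
  | [] => [[]]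
  | c :: cs =>
      if c = d then [] :: pvSplit1 d cs
      else match pvSplit1 d cs with
        | [] => [[c]]
        | t :: ts => (c :: t) :: ts

/-- Split on any of the three delimiters (canonical form of B's scan). -/
def pvSplitAny : List Char → List (List Char)
  | [] => [[]]
  | c :: cs =>
      if pvIsDelim c then [] :: pvSplitAny cs
      else match pvSplitAny cs with
        | [] => [[c]]
        | t :: ts => (c :: t) :: ts

/-- Prepend `cur` onto the first piece. -/
def pvGlue (cur : List Char) : List (List Char) → List (List Char)
  | [] => [cur]
  | t :: ts => (cur ++ t) :: ts

theorem pvSplit1_ne_nil (d : Char) (cs : List Char) : pvSplit1 d cs ≠ [] := by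
  cases cs with
  | nil => simp [pvSplit1]
  | cons c cs =>
    simp only [pvSplit1]
    split
    · simp
    · split <;> simp

theorem pvSplitAny_ne_nil (cs : List Char) : pvSplitAny cs ≠ [] := by
  cases cs with
  | nil => simp [pvSplitAny]
  | cons c cs =>
    simp only [pvSplitAny]
    split
    · simp
    · split <;> simp

theorem pvSplitOn_go_single (d : Char) (l : List Char) : ∀ (fuel : Nat) (cur : List Char)
    (acc : List (List Char)), l.length ≤ fuel →
    PySem.Chars.splitOn.go [d] fuel l cur acc
      = acc.reverse ++ pvGlue cur.reverse (pvSplit1 d l) := by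
  induction l with
  | nil =>
    intro fuel cur acc _
    cases fuel <;> simp [PySem.Chars.splitOn.go, pvSplit1, pvGlue]
  | cons c rest ih =>
    intro fuel cur acc hf
    cases fuel with
    | zero => simp at hf
    | succ f =>
      have hrest : rest.length ≤ f := by simpa using hf
      by_cases hc : c = d
      · subst hc
        have h1 : PySem.Chars.splitOn.go [c] (f + 1) (c :: rest) cur acc
            = PySem.Chars.splitOn.go [c] f rest [] (cur.reverse :: acc) := by
          simp [PySem.Chars.splitOn.go, List.isPrefixOf]
        rw [h1, ih f [] (cur.reverse :: acc) hrest]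
        simp only [pvSplit1, if_pos rfl, pvGlue, List.reverse_nil, List.reverse_cons,
          List.append_assoc, List.singleton_append]
        cases hsp : pvSplit1 c rest with
        | nil => exact absurd hsp (pvSplit1_ne_nil c rest)
        | cons t ts => simp [pvGlue]
      · have hdc : ¬ d = c := fun h => hc h.symm
        have h1 : PySem.Chars.splitOn.go [d] (f + 1) (c :: rest) cur acc
            = PySem.Chars.splitOn.go [d] f rest (c :: cur) acc := by
          simp [PySem.Chars.splitOn.go, List.isPrefixOf, beq_iff_eq, hdc]
        rw [h1, ih f (c :: cur) acc hrest]
        simp only [pvSplit1, if_neg hc]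
        cases hsp : pvSplit1 d rest with
        | nil => exact absurd hsp (pvSplit1_ne_nil d rest)
        | cons t ts => simp [pvGlue]

theorem pvSplitOn_single (s : List Char) (d : Char) :
    PySem.Chars.splitOn s [d] = pvSplit1 d s := by
  unfold PySem.Chars.splitOn
  rw [pvSplitOn_go_single d s (s.length + 1) [] [] (by omega)]
  cases hsp : pvSplit1 d s with
  | nil => exact absurd hsp (pvSplit1_ne_nil d s)
  | cons t ts => simp [pvGlue]

theorem pvReplace_go (l : List Char) : ∀ (fuel : Nat) (acc : List Char), l.length ≤ fuel →
    PySem.Chars.replace.go [','] ['+'] fuel l acc = acc.reverse ++ l.map pvSub := by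
  induction l with
  | nil => intro fuel acc _; cases fuel <;> simp [PySem.Chars.replace.go]
  | cons c rest ih =>
    intro fuel acc hf
    cases fuel with
    | zero => simp at hf
    | succ f =>
      have hrest : rest.length ≤ f := by simpa using hf
      by_cases hc : c = ','
      · subst hc
        have h1 : PySem.Chars.replace.go [','] ['+'] (f + 1) (',' :: rest) acc
            = PySem.Chars.replace.go [','] ['+'] f rest ('+' :: acc) := by
          simp [PySem.Chars.replace.go, List.isPrefixOf]
        rw [h1, ih f _ hrest]
        simp [pvSub]
      · have hdc : ¬ ',' = c := fun h => hc h.symm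
        have h1 : PySem.Chars.replace.go [','] ['+'] (f + 1) (c :: rest) acc
            = PySem.Chars.replace.go [','] ['+'] f rest (c :: acc) := by
          simp [PySem.Chars.replace.go, List.isPrefixOf, beq_iff_eq, hdc]
        rw [h1, ih f _ hrest]
        simp [pvSub, hc]

theorem pvReplace_comma (s : List Char) :
    PySem.Chars.replace s [','] ['+'] = s.map pvSub := by
  unfold PySem.Chars.replace
  rw [if_neg (by simp)]
  exact pvReplace_go s s.length [] le_rfl

/-- A's two-stage tokenisation equals the one-pass three-delimiter split. -/
theorem pvTokens_eq (s : List Char) :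
    (pvSplit1 '|' s).flatMap (fun chunk => pvSplit1 '+' (chunk.map pvSub)) = pvSplitAny s := by
  induction s with
  | nil => simp [pvSplit1, pvSplitAny]
  | cons c cs ih =>
    by_cases hbar : c = '|'
    · subst hbar
      simp only [pvSplit1, if_pos rfl, List.flatMap_cons,
        show pvSplit1 '+' (List.map pvSub []) = [[]] from rfl, List.singleton_append]
      simp only [pvSplitAny, show pvIsDelim '|' = true from rfl, if_pos]
      exact congrArg (List.cons []) ih
    · simp only [pvSplit1, if_neg hbar]
      cases hsp : pvSplit1 '|' cs with
      | nil => exact absurd hsp (pvSplit1_ne_nil _ _)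
      | cons t ts =>
        rw [hsp] at ih
        simp only [List.flatMap_cons, List.map_cons] at ih ⊢
        by_cases hd : pvSub c = '+'
        · -- c is ',' or '+': a delimiter
          have hdelim : pvIsDelim c = true := by
            unfold pvIsDelim
            by_cases h2 : c = ','
            · simp [h2]
            · simp only [pvSub, if_neg h2] at hd; simp [hd]
          simp only [pvSplit1, if_pos hd, List.cons_append]
          simp only [pvSplitAny, hdelim, if_pos]
          exact congrArg (List.cons []) ih
        · have h2 : ¬ c = ',' := fun h => hd (by simp [pvSub, h])
          have h3 : ¬ c = '+' := by
            intro h; exact hd (by simp [pvSub, h2, h])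
          have hdelim : pvIsDelim c = false := by
            unfold pvIsDelim; simp [hbar, h2, h3]
          simp only [pvSplit1, if_neg hd]
          cases hsp2 : pvSplit1 '+' (t.map pvSub) with
          | nil => exact absurd hsp2 (pvSplit1_ne_nil _ _)
          | cons u us =>
            rw [hsp2] at ih
            simp only [List.cons_append] at ih ⊢
            simp only [pvSplitAny, hdelim, Bool.false_eq_true, if_false]
            rw [← ih]
            simp [pvSub, h2]

/-- B's scan computes `pvSplitAny`. -/
theorem pvScan_eq (cs : List Char) : ∀ (acc : List (List Char)) (cur : List Char),
    (cs.foldl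
      (fun (st : List (List Char) × List Char) ch =>
        if ch = '|' || ch = '+' || ch = ',' then (st.1 ++ [st.2], ([] : List Char))
        else (st.1, st.2 ++ [ch]))
      (acc, cur)).1 ++
    [(cs.foldl
      (fun (st : List (List Char) × List Char) ch =>
        if ch = '|' || ch = '+' || ch = ',' then (st.1 ++ [st.2], ([] : List Char))
        else (st.1, st.2 ++ [ch]))
      (acc, cur)).2]
      = acc ++ pvGlue cur (pvSplitAny cs) := by
  induction cs with
  | nil => intro acc cur; simp [pvSplitAny, pvGlue]
  | cons c cs ih =>
    intro acc cur
    simp only [List.foldl_cons]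
    by_cases hdelim : pvIsDelim c = true
    · have hb : (c = '|' || c = '+' || c = ',') = true := hdelim
      rw [if_pos hb, ih]
      simp only [pvSplitAny, hdelim, if_pos]
      cases h : pvSplitAny cs with
      | nil => exact absurd h (pvSplitAny_ne_nil cs)
      | cons t ts => simp [pvGlue]
    · have hb : ¬ ((c = '|' || c = '+' || c = ',') = true) := hdelim
      have hd2 : pvIsDelim c = false := by simpa using hdelim
      rw [if_neg hb, ih]
      simp only [pvSplitAny, hd2, Bool.false_eq_true, if_false]
      cases h : pvSplitAny cs with
      | nil => exact absurd h (pvSplitAny_ne_nil cs)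
      | cons t ts => simp [pvGlue]

/-- A's append-if-unseen fold over any token stream equals B's ordered dedup of the stripped
    non-empty tokens, generalised over the accumulated state. -/
theorem pvDedup_fold (ts : List (List Char)) :
    ∀ (g seen : List (List Char)), (∀ v, v ∈ seen ↔ v ∈ g) →
    (ts.foldl
      (fun (st : List (List Char) × PySem.Set (List Char)) token =>
        let value := PySem.Chars.strip token
        if !value.isEmpty && !st.2.contains value then
          (st.1 ++ [value], st.2.add value)
        else st) (g, seen)).1
      = List.foldl PySem.Set.add g ((ts.map PySem.Chars.strip).filter (fun v => !v.isEmpty)) := by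
  induction ts with
  | nil => intro g seen _; simp
  | cons t ts ih =>
    intro g seen hinv
    have hstep : (fun (st : List (List Char) × PySem.Set (List Char)) token =>
        let value := PySem.Chars.strip token
        if !value.isEmpty && !st.2.contains value then
          (st.1 ++ [value], st.2.add value)
        else st) (g, seen) t
        = if !(PySem.Chars.strip t).isEmpty && !seen.contains (PySem.Chars.strip t) then
            (g ++ [PySem.Chars.strip t], PySem.Set.add seen (PySem.Chars.strip t))
          else (g, seen) := rfl
    simp only [List.foldl_cons, hstep, List.map_cons, List.filter_cons]
    by_cases hemp : (PySem.Chars.strip t).isEmpty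
    · rw [show (if (!(PySem.Chars.strip t).isEmpty && !seen.contains (PySem.Chars.strip t)) = true
          then (g ++ [PySem.Chars.strip t], PySem.Set.add seen (PySem.Chars.strip t))
          else (g, seen)) = (g, seen) from if_neg (by simp [hemp]),
        show (if (!(PySem.Chars.strip t).isEmpty) = true
          then PySem.Chars.strip t :: List.filter (fun v => !v.isEmpty) (List.map PySem.Chars.strip ts)
          else List.filter (fun v => !v.isEmpty) (List.map PySem.Chars.strip ts))
          = List.filter (fun v => !v.isEmpty) (List.map PySem.Chars.strip ts) from if_neg (by simp [hemp])]
      exact ih g seen hinv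
    · rw [show (if (!(PySem.Chars.strip t).isEmpty) = true
          then PySem.Chars.strip t :: List.filter (fun v => !v.isEmpty) (List.map PySem.Chars.strip ts)
          else List.filter (fun v => !v.isEmpty) (List.map PySem.Chars.strip ts))
          = PySem.Chars.strip t :: List.filter (fun v => !v.isEmpty) (List.map PySem.Chars.strip ts)
          from if_pos (by simp [hemp]), List.foldl_cons]
      by_cases hmem : PySem.Chars.strip t ∈ g
      · have hcont : seen.contains (PySem.Chars.strip t) = true :=
          List.elem_eq_true_of_mem ((hinv _).2 hmem)
        have hcong : g.contains (PySem.Chars.strip t) = true :=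
          List.elem_eq_true_of_mem hmem
        rw [show (if (!(PySem.Chars.strip t).isEmpty && !seen.contains (PySem.Chars.strip t)) = true
            then (g ++ [PySem.Chars.strip t], PySem.Set.add seen (PySem.Chars.strip t))
            else (g, seen)) = (g, seen) from if_neg (by
              simp [hcont]
              exact fun _ => (hinv _).2 hmem)]
        rw [show PySem.Set.add g (PySem.Chars.strip t) = g from by
          simp [PySem.Set.add, hcong, hmem]]
        exact ih g seen hinv
      · have hcont : seen.contains (PySem.Chars.strip t) = false := by
          rw [Bool.eq_false_iff]
          intro h
          exact hmem ((hinv _).1 (List.mem_of_elem_eq_true h))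
        have hcong : g.contains (PySem.Chars.strip t) = false := by
          rw [Bool.eq_false_iff]
          intro h
          exact hmem (List.mem_of_elem_eq_true h)
        rw [show (if (!(PySem.Chars.strip t).isEmpty && !seen.contains (PySem.Chars.strip t)) = true
            then (g ++ [PySem.Chars.strip t], PySem.Set.add seen (PySem.Chars.strip t))
            else (g, seen)) = (g ++ [PySem.Chars.strip t], PySem.Set.add seen (PySem.Chars.strip t))
            from if_pos (by
              simp [hemp]
              exact fun h => hmem ((hinv _).1 h))]
        rw [show PySem.Set.add g (PySem.Chars.strip t) = g ++ [PySem.Chars.strip t]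
            from by simp [PySem.Set.add, hcong, hmem]]
        exact ih (g ++ [PySem.Chars.strip t]) (PySem.Set.add seen (PySem.Chars.strip t))
          (by intro v; rw [PySem.Set.mem_add]; simp [hinv v, List.mem_append])

-- ===== VERDICT (by name: the statement is the Claim_ definition above) =====
theorem parse_language_groups_spec : Claim_equal_parse_language_groups := by
  intro raw_value _
  unfold Spec_parse_language_groups parse_language_groups parse_language_groups_alt
  apply congrArg (List.map String.mk)
  simp only [pvSplitOn_single, pvReplace_comma]
  rw [← List.foldl_flatMap, pvTokens_eq ((raw_value.getD "").toList),
    pvDedup_fold _ [] PySem.Set.empty (by intro v; simp [PySem.Set.empty])]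
  have hB := pvScan_eq ((raw_value.getD "").toList) [] []
  simp only [List.nil_append] at hB
  have htok : ((raw_value.getD "").toList.foldl
      (fun (st : List (List Char) × List Char) ch =>
        if ch = '|' || ch = '+' || ch = ',' then (st.1 ++ [st.2], ([] : List Char))
        else (st.1, st.2 ++ [ch])) ([], [])).1 ++
      [((raw_value.getD "").toList.foldl
      (fun (st : List (List Char) × List Char) ch =>
        if ch = '|' || ch = '+' || ch = ',' then (st.1 ++ [st.2], ([] : List Char))
        else (st.1, st.2 ++ [ch])) ([], [])).2]
      = pvSplitAny ((raw_value.getD "").toList) := by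
    rw [hB]
    cases h : pvSplitAny ((raw_value.getD "").toList) with
    | nil => exact absurd h (pvSplitAny_ne_nil _)
    | cons t ts => simp [pvGlue]
  simp only [PySem.List.dedup, PySem.Set.ofList, htok, PySem.Set.empty]
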